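-- pv_equiv track=rewrite | github.com/ucsdmanorlab/PSSR2 | pssr/data.py | _get_image_idx
-- ===== SOURCE A (Python) =====
-- def _get_image_idx(idx, slices, tiles=None):
--     tiles = [1]*len(slices) if tiles is None else tiles
--
--     image_idx = 0
--     for slice, tile in zip(slices, tiles):
--         if idx < slice * tile:
--             return image_idx, idx
--         else:
--             idx -= slice * tile
--             image_idx += 1
-- ===== SOURCE B (Python) =====
-- def _get_image_idx(idx, slices, tiles=None):
--     # widths per image (zip truncates to the shorter list, as in A)
--     if tiles is None:
--         widths = list(slices)
--     else:
--         widths = [s * t for s, t in zip(slices, tiles)]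
--     # cumulative boundaries
--     bounds = []
--     total = 0
--     for w in widths:
--         total += w
--         bounds.append(total)
--     # first boundary strictly above idx
--     prev = 0
--     for i, b in enumerate(bounds):
--         if idx < b:
--             return i, idx - prev
--         prev = b
-- ===== Notes on version B (the rewrite author's own statement) =====
-- stated objective: alternative
-- what changed: B precomputes cumulative slice*tile boundaries and then locates idx by scanning for the first boundary strictly above it, instead of destructively subtracting each width from idx inside one loop.
import Mathlib
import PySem

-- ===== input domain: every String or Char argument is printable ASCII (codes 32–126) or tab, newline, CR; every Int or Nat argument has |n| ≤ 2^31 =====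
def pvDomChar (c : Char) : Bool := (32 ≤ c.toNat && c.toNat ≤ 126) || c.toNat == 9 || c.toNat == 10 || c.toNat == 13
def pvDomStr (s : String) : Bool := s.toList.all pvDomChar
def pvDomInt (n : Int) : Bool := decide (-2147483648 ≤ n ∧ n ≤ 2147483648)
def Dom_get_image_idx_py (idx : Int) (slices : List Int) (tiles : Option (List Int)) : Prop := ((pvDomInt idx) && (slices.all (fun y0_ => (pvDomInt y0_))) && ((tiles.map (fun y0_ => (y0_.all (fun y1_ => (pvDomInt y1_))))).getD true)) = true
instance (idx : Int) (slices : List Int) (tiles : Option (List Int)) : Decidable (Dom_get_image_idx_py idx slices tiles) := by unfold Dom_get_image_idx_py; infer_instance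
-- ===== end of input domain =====

-- B replaces A's destructive subtract-in-a-loop by precomputed cumulative boundaries plus a
-- scan for the first boundary strictly above idx (objective: alternative decomposition).

-- ===== PORT A =====
-- A's loop over zip(slices, tiles), subtracting slice*tile from idx and incrementing image_idx.
def pvGoA (idx image_idx : Int) : List (Int × Int) → Option (Int × Int)
  | [] => none
  | (s, t) :: rest =>
    if idx < s * t then some (image_idx, idx)
    else pvGoA (idx - s * t) (image_idx + 1) rest

def get_image_idx_py (idx : Int) (slices : List Int) (tiles : Option (List Int)) : Option (Int × Int) :=
  let tiles' := match tiles with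
    | none => List.replicate slices.length 1
    | some t => t
  pvGoA idx 0 (slices.zip tiles')

-- ===== PORT B =====
-- cumulative boundaries of the widths (B's `total`/`bounds` loop)
def pvBounds (total : Int) : List Int → List Int
  | [] => []
  | w :: ws => (total + w) :: pvBounds (total + w) ws

-- B's final loop: first boundary b with idx < b, carrying prev
def pvScanB (idx i prev : Int) : List Int → Option (Int × Int)
  | [] => none
  | b :: bs => if idx < b then some (i, idx - prev) else pvScanB idx (i + 1) b bs

def get_image_idx_py_alt (idx : Int) (slices : List Int) (tiles : Option (List Int)) : Option (Int × Int) :=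
  let widths := match tiles with
    | none => slices
    | some t => (slices.zip t).map (fun p => p.1 * p.2)
  pvScanB idx 0 0 (pvBounds 0 widths)

-- ===== PRECONDITION & SPEC =====
def Spec_get_image_idx_py (idx : Int) (slices : List Int) (tiles : Option (List Int)) (out : Option (Int × Int)) : Prop := out = get_image_idx_py_alt idx slices tiles
instance (idx : Int) (slices : List Int) (tiles : Option (List Int)) (out : Option (Int × Int)) : Decidable (Spec_get_image_idx_py idx slices tiles out) := by unfold Spec_get_image_idx_py; infer_instance

-- ===== CLAIM (what is proved, stated in full; the proofs are below) =====
def Claim_equal_get_image_idx_py : Prop := ∀ (idx : Int) (slices : List Int) (tiles : Option (List Int)), Dom_get_image_idx_py idx slices tiles → Spec_get_image_idx_py idx slices tiles (get_image_idx_py idx slices tiles)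

-- ===== LEMMAS AND PROOFS =====
-- A's subtract-loop over pairs equals B's scan over the cumulative bounds of the widths.
theorem pvGoA_eq_scan (ps : List (Int × Int)) :
    ∀ (i total idx : Int),
      pvGoA (idx - total) i ps = pvScanB idx i total (pvBounds total (ps.map (fun p => p.1 * p.2))) := by
  induction ps with
  | nil => intro i total idx; simp [pvGoA, pvBounds, pvScanB]
  | cons p rest ih =>
    intro i total idx
    obtain ⟨s, t⟩ := p
    simp only [List.map, pvGoA, pvBounds, pvScanB]
    by_cases h : idx < total + s * t
    · rw [if_pos (by omega), if_pos h]
    · rw [if_neg (by omega), if_neg h]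
      have := ih (i + 1) (total + s * t) idx
      rw [show idx - total - s * t = idx - (total + s * t) by ring]
      exact this

-- zipping with [1,1,…] and multiplying gives back the list
theorem pvZip_ones (xs : List Int) :
    (xs.zip (List.replicate xs.length 1)).map (fun p => p.1 * p.2) = xs := by
  induction xs with
  | nil => rfl
  | cons x xs ih => simp [List.replicate, ih]

-- ===== VERDICT (by name: the statement is the Claim_ definition above) =====
theorem get_image_idx_py_spec : Claim_equal_get_image_idx_py := by
  intro idx slices tiles _
  unfold Spec_get_image_idx_py get_image_idx_py get_image_idx_py_alt
  cases tiles with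
  | none =>
    simpa [pvZip_ones] using pvGoA_eq_scan (slices.zip (List.replicate slices.length 1)) 0 0 idx
  | some t =>
    simpa using pvGoA_eq_scan (slices.zip t) 0 0 idx
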